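-- pv_equiv track=rewrite | github.com/chuang-lab-DMPTD-TMU/dengue-fever-EWS | dengue-infection-module/scripts/OpenDengue/4_impute_to_region.py | month_dates_for_year
-- ===== SOURCE A (Python) =====
-- MONTH_RANGES = [
--     ("01", "01", "31"), ("02", "02", "28"), ("03", "03", "31"), ("04", "04", "30"),
--     ("05", "05", "31"), ("06", "06", "30"), ("07", "07", "31"), ("08", "08", "31"),
--     ("09", "09", "30"), ("10", "10", "31"), ("11", "11", "30"), ("12", "12", "31"),
-- ]
--
-- def month_dates_for_year(year):
--     dates = []
--     for mm, _, _ in MONTH_RANGES: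
--         import calendar
--         last_day = calendar.monthrange(year, int(mm))[1]
--         start = f"{year}-{mm}-01"
--         end = f"{year}-{mm}-{last_day:02d}"
--         dates.append((start, end))
--     return dates
-- ===== SOURCE B (Python) =====
-- def month_dates_for_year(year):
--     lengths = [31, 28, 31, 30, 31, 30, 31, 31, 30, 31, 30, 31]
--     dates = []
--     for m in range(1, 13):
--         last_day = lengths[m - 1]
--         if m == 2 and year % 4 == 0 and (year % 100 != 0 or year % 400 == 0):
--             last_day = 29
--         mm = f"{m:02d}"
--         dates.append((f"{year}-{mm}-01", f"{year}-{mm}-{last_day:02d}"))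
--     return dates
-- ===== Notes on version B (the rewrite author's own statement) =====
-- stated objective: alternative
-- what changed: B drops the calendar import and the MONTH_RANGES string table: it iterates month numbers 1..12 over a fixed list of month lengths, overriding February via an inline leap-year formula and zero-padding the month number itself, instead of parsing month strings back to ints and calling calendar.monthrange per month.
import Mathlib
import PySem

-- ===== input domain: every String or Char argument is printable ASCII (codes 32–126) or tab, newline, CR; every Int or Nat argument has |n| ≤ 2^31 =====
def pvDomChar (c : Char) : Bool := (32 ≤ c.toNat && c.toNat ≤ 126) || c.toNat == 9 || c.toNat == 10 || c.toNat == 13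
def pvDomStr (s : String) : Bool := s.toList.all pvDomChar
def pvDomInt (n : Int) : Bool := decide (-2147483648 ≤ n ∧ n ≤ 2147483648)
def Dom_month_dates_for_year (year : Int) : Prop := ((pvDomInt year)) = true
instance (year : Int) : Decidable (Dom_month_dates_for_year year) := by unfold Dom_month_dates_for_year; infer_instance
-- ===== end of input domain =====

-- B drops the calendar import and the string table: month numbers 1..12 over a fixed
-- length list with an inline leap formula (objective: alternative; return value only).


-- shared helper: Python's f"{n:02d}" for a nonnegative int (exact there; all uses are 1..31)
def pyFmt02 (n : Int) : String :=
  let s := PySem.Int.toStr n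
  if PySem.Str.len s < 2 then "0" ++ s else s

-- ===== PORT A =====
-- calendar.isleap, transliterated (Python 'and'/'or' on these comparisons = Bool &&/||)
def calIsLeap (y : Int) : Bool :=
  (PySem.Int.mod y 4 == 0) && ((PySem.Int.mod y 100 != 0) || (PySem.Int.mod y 400 == 0))

-- calendar.mdays and monthrange(year, m)[1] = mdays[m] + (m == 2 and isleap(year)), exact for m in 1..12
def calMdays : List Int := [0, 31, 28, 31, 30, 31, 30, 31, 31, 30, 31, 30, 31]

def calMonthrangeDay (y m : Int) : Int :=
  PySem.List.pyGetD calMdays m 0 + (if m == 2 && calIsLeap y then 1 else 0)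

def MONTH_RANGES : List (String × String × String) :=
  [("01", "01", "31"), ("02", "02", "28"), ("03", "03", "31"), ("04", "04", "30"),
   ("05", "05", "31"), ("06", "06", "30"), ("07", "07", "31"), ("08", "08", "31"),
   ("09", "09", "30"), ("10", "10", "31"), ("11", "11", "30"), ("12", "12", "31")]

def month_dates_for_year (year : Int) : List (String × String) :=
  MONTH_RANGES.foldl
    (fun dates t =>
      let mm := t.1
      let lastDay := calMonthrangeDay year ((PySem.Int.ofStr? mm).getD 0)  -- int(mm); always parses here
      let start := PySem.Int.toStr year ++ "-" ++ mm ++ "-01"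
      let «end» := PySem.Int.toStr year ++ "-" ++ mm ++ "-" ++ pyFmt02 lastDay
      dates ++ [(start, «end»)])
    []

-- ===== PORT B =====
def altLengths : List Int := [31, 28, 31, 30, 31, 30, 31, 31, 30, 31, 30, 31]

def altLeap (y : Int) : Bool :=
  (PySem.Int.mod y 4 == 0) && ((PySem.Int.mod y 100 != 0) || (PySem.Int.mod y 400 == 0))

def month_dates_for_year_alt (year : Int) : List (String × String) :=
  (PySem.List.pyRange 1 13 1).foldl
    (fun dates m =>
      let lastDay₀ := PySem.List.pyGetD altLengths (m - 1) 0
      let lastDay := if m == 2 && altLeap year then 29 else lastDay₀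
      let mm := pyFmt02 m
      dates ++ [(PySem.Int.toStr year ++ "-" ++ mm ++ "-01",
                 PySem.Int.toStr year ++ "-" ++ mm ++ "-" ++ pyFmt02 lastDay)])
    []

-- ===== PRECONDITION & SPEC =====
def Spec_month_dates_for_year (year : Int) (out : List (String × String)) : Prop := out = month_dates_for_year_alt year
instance (year : Int) (out : List (String × String)) : Decidable (Spec_month_dates_for_year year out) := by unfold Spec_month_dates_for_year; infer_instance

-- ===== CLAIM (what is proved, stated in full; the proofs are below) =====
def Claim_equal_month_dates_for_year : Prop := ∀ (year : Int), Dom_month_dates_for_year year → Spec_month_dates_for_year year (month_dates_for_year year)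

-- ===== LEMMAS AND PROOFS =====
theorem altLeap_eq_calIsLeap (y : Int) : altLeap y = calIsLeap y := rfl

-- ===== VERDICT (by name: the statement is the Claim_ definition above) =====
theorem month_dates_for_year_spec : Claim_equal_month_dates_for_year := by
  intro year _
  unfold Spec_month_dates_for_year month_dates_for_year month_dates_for_year_alt
  cases h : calIsLeap year with
  | false =>
      simp [calMonthrangeDay, altLeap_eq_calIsLeap, h, MONTH_RANGES]
      rfl
  | true =>
      simp [calMonthrangeDay, altLeap_eq_calIsLeap, h, MONTH_RANGES]
      rfl
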